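-- pv_equiv track=rewrite | github.com/ogun/advent-of-code-2019 | aoc_2019.py | convert_path_to_wire
-- ===== SOURCE A (Python) =====
-- def convert_path_to_wire(paths):
--     wire = []
--     cur_x, cur_y = (0, 0)
--
--     path_to_wire = {
--         "U": lambda cur_x, cur_y, step: [
--             (cur_x, i) for i in range(cur_y + 1, cur_y + 1 + step)
--         ],
--         "R": lambda cur_x, cur_y, step: [
--             (i, cur_y) for i in range(cur_x + 1, cur_x + 1 + step)
--         ],
--         "D": lambda cur_x, cur_y, step: [
--             (cur_x, i) for i in range(cur_y - 1, cur_y - 1 - step, -1)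
--         ],
--         "L": lambda cur_x, cur_y, step: [
--             (i, cur_y) for i in range(cur_x - 1, cur_x - 1 - step, -1)
--         ],
--     }
--
--     wire.append((cur_x, cur_y))
--     for path in paths:
--         direction = path[0]
--         step = path[1]
--
--         wire.extend(path_to_wire[direction](cur_x, cur_y, step))
--         cur_x, cur_y = wire[-1]
--
--     return wire
-- ===== SOURCE B (Python) =====
-- def convert_path_to_wire(paths):
--     deltas = {"U": (0, 1), "R": (1, 0), "D": (0, -1), "L": (-1, 0)}
--     x, y = 0, 0
--     wire = [(0, 0)]
--     for direction, step in paths: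
--         dx, dy = deltas[direction]
--         for _ in range(step):
--             x += dx
--             y += dy
--             wire.append((x, y))
--     return wire
-- ===== Notes on version B (the rewrite author's own statement) =====
-- stated objective: idiomatic
-- what changed: Replaces the dict of four per-direction range-comprehension lambdas (and the cur = wire[-1] re-read) with a single generic incremental walk: a unit-delta table and one inner loop that advances a cursor step times, appending each point.
import Mathlib
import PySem

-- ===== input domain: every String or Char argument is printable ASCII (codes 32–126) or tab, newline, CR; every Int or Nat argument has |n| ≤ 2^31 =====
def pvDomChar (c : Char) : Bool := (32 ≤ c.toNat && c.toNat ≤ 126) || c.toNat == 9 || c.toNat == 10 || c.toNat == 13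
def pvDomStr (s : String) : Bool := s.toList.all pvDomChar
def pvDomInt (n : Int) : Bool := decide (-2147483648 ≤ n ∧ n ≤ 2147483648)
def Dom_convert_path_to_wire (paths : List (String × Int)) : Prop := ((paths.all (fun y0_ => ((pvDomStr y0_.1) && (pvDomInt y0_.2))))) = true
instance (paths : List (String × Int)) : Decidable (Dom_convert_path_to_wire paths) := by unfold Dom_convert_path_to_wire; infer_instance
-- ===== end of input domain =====

-- B replaces A's dict of four per-direction range-comprehension lambdas (plus the
-- cur = wire[-1] re-read) by a single generic incremental walk over a unit-delta
-- table, advancing a cursor step times and appending each point (objective: idiomatic).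


-- ===== PORT A =====
-- path_to_wire[d](cur_x, cur_y, step): the four range comprehensions; unknown key = KeyError,
-- modelled as [] (such inputs are outside Pre_).
def pvSegA (d : String) (cx cy step : Int) : List (Int × Int) :=
  if d = "U" then (PySem.List.pyRange (cy + 1) (cy + 1 + step) 1).map (fun i => (cx, i))
  else if d = "R" then (PySem.List.pyRange (cx + 1) (cx + 1 + step) 1).map (fun i => (i, cy))
  else if d = "D" then (PySem.List.pyRange (cy - 1) (cy - 1 - step) (-1)).map (fun i => (cx, i))
  else if d = "L" then (PySem.List.pyRange (cx - 1) (cx - 1 - step) (-1)).map (fun i => (i, cy))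
  else []

def convert_path_to_wire (paths : List (String × Int)) : List (Int × Int) :=
  (paths.foldl
    (fun (st : List (Int × Int) × Int × Int) path =>
      let wire := st.1 ++ pvSegA path.1 st.2.1 st.2.2 path.2
      let cur := (PySem.List.pyGet? wire (-1)).getD (0, 0)   -- cur_x, cur_y = wire[-1] (wire is never empty)
      (wire, cur))
    ([(0, 0)], 0, 0)).1

-- ===== PORT B =====
def pvDeltasB : PySem.Dict String (Int × Int) :=
  PySem.Dict.ofList [("U", (0, 1)), ("R", (1, 0)), ("D", (0, -1)), ("L", (-1, 0))]

-- 'for _ in range(step)': move the cursor n times, collecting the visited points.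
def pvWalkB (dx dy : Int) : Nat → Int → Int → List (Int × Int) × Int × Int
  | 0, x, y => ([], x, y)
  | n + 1, x, y =>
      let x' := x + dx
      let y' := y + dy
      let r := pvWalkB dx dy n x' y'
      ((x', y') :: r.1, r.2)

def convert_path_to_wire_alt (paths : List (String × Int)) : List (Int × Int) :=
  (paths.foldl
    (fun (st : List (Int × Int) × Int × Int) p =>
      match pvDeltasB.get? p.1 with
      | some (dx, dy) =>
          let r := pvWalkB dx dy p.2.toNat st.2.1 st.2.2
          (st.1 ++ r.1, r.2)
      | none => st)   -- KeyError: outside Pre_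
    ([(0, 0)], 0, 0)).1

-- ===== PRECONDITION & SPEC =====
-- Pre_ excludes exactly the inputs where Python A raises KeyError: a direction
-- outside {"U","R","D","L"} (B raises there too).
def Pre_convert_path_to_wire (paths : List (String × Int)) : Prop :=
  ∀ p ∈ paths, p.1 = "U" ∨ p.1 = "R" ∨ p.1 = "D" ∨ p.1 = "L"
instance (paths : List (String × Int)) : Decidable (Pre_convert_path_to_wire paths) := by unfold Pre_convert_path_to_wire; infer_instance

def pvWitness_convert_path_to_wire : (List (String × Int)) := [("R", 2), ("U", 1), ("D", 0)]

def Spec_convert_path_to_wire (paths : List (String × Int)) (out : List (Int × Int)) : Prop := out = convert_path_to_wire_alt paths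
instance (paths : List (String × Int)) (out : List (Int × Int)) : Decidable (Spec_convert_path_to_wire paths out) := by unfold Spec_convert_path_to_wire; infer_instance

-- ===== CLAIM (what is proved, stated in full; the proofs are below) =====
def Claim_equal_convert_path_to_wire : Prop := ∀ (paths : List (String × Int)), Dom_convert_path_to_wire paths → Pre_convert_path_to_wire paths → Spec_convert_path_to_wire paths (convert_path_to_wire paths)

-- ===== LEMMAS AND PROOFS =====

-- the walk's final cursor is its last collected point (or the start if it collected none)
theorem pvWalkB_last (dx dy : Int) : ∀ (n : Nat) (x y : Int),
    ((pvWalkB dx dy n x y).1.getLast?).getD (x, y) = (pvWalkB dx dy n x y).2 := by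
  intro n
  induction n with
  | zero => intro x y; simp [pvWalkB]
  | succ n ih =>
      intro x y
      simp only [pvWalkB]
      rw [List.getLast?_cons, ← ih (x + dx) (y + dy)]
      cases h : (pvWalkB dx dy n (x + dx) (y + dy)).1.getLast? <;> simp [h]

-- closed form of the walk's collected points
theorem walk_gen (dx dy : Int) : ∀ (n : Nat) (x y : Int),
    (pvWalkB dx dy n x y).1
      = (List.range n).map (fun (k : Nat) => (x + dx * ((k : Int) + 1), y + dy * ((k : Int) + 1))) := by
  intro n
  induction n with
  | zero => intro x y; simp [pvWalkB]
  | succ n ih =>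
      intro x y
      simp only [pvWalkB, List.range_succ_eq_map, List.map_cons, List.map_map]
      rw [ih (x + dx) (y + dy)]
      congr 1
      · simp only [Nat.cast_zero, Prod.mk.injEq]; constructor <;> ring
      · apply List.map_congr_left
        intro k _
        simp only [Function.comp, Prod.mk.injEq]
        constructor <;> push_cast <;> ring

-- bridging Int step to Nat iterations: negative steps give empty ranges
theorem pyRange_up_toNat (a s : Int) :
    PySem.List.pyRange a (a + s) 1 = PySem.List.pyRange a (a + (s.toNat : Int)) 1 := by
  by_cases h : 0 ≤ s
  · rw [Int.toNat_of_nonneg h]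
  · rw [PySem.List.pyRange_one_eq_nil (by omega), PySem.List.pyRange_one_eq_nil (by omega)]

theorem pyRange_down_toNat (a s : Int) :
    PySem.List.pyRange a (a - s) (-1) = PySem.List.pyRange a (a - (s.toNat : Int)) (-1) := by
  by_cases h : 0 ≤ s
  · rw [Int.toNat_of_nonneg h]
  · rw [PySem.List.pyRange_neg_one_eq_nil (by omega), PySem.List.pyRange_neg_one_eq_nil (by omega)]

-- the four direction segments of A are B's generic walks
theorem segA_U (x y s : Int) : pvSegA "U" x y s = (pvWalkB 0 1 s.toNat x y).1 := by
  rw [walk_gen]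
  simp only [pvSegA, String.reduceEq, reduceIte, if_true]
  rw [pyRange_up_toNat, PySem.List.pyRange_one]
  have h : (y + 1 + (s.toNat : Int) - (y + 1)).toNat = s.toNat := by omega
  rw [h, List.map_map]
  apply List.map_congr_left
  intro k _
  simp only [Function.comp, Prod.mk.injEq]
  constructor <;> push_cast <;> ring

theorem segA_R (x y s : Int) : pvSegA "R" x y s = (pvWalkB 1 0 s.toNat x y).1 := by
  rw [walk_gen]
  simp only [pvSegA, String.reduceEq, reduceIte, if_true]
  rw [pyRange_up_toNat, PySem.List.pyRange_one]
  have h : (x + 1 + (s.toNat : Int) - (x + 1)).toNat = s.toNat := by omega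
  rw [h, List.map_map]
  apply List.map_congr_left
  intro k _
  simp only [Function.comp, Prod.mk.injEq]
  constructor <;> push_cast <;> ring

theorem segA_D (x y s : Int) : pvSegA "D" x y s = (pvWalkB 0 (-1) s.toNat x y).1 := by
  rw [walk_gen]
  simp only [pvSegA, String.reduceEq, reduceIte, if_true]
  rw [pyRange_down_toNat, PySem.List.pyRange_neg_one]
  have h : (y - 1 - (y - 1 - (s.toNat : Int))).toNat = s.toNat := by omega
  rw [h, List.map_map]
  apply List.map_congr_left
  intro k _
  simp only [Function.comp, Prod.mk.injEq]
  constructor <;> push_cast <;> ring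

theorem segA_L (x y s : Int) : pvSegA "L" x y s = (pvWalkB (-1) 0 s.toNat x y).1 := by
  rw [walk_gen]
  simp only [pvSegA, String.reduceEq, reduceIte, if_true]
  rw [pyRange_down_toNat, PySem.List.pyRange_neg_one]
  have h : (x - 1 - (x - 1 - (s.toNat : Int))).toNat = s.toNat := by omega
  rw [h, List.map_map]
  apply List.map_congr_left
  intro k _
  simp only [Function.comp, Prod.mk.injEq]
  constructor <;> push_cast <;> ring

-- main invariant induction over paths
theorem fold_eq : ∀ (paths : List (String × Int)) (wire : List (Int × Int)) (x y : Int),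
    (∀ p ∈ paths, p.1 = "U" ∨ p.1 = "R" ∨ p.1 = "D" ∨ p.1 = "L") →
    wire.getLast? = some (x, y) →
    paths.foldl
      (fun (st : List (Int × Int) × Int × Int) path =>
        let wire := st.1 ++ pvSegA path.1 st.2.1 st.2.2 path.2
        let cur := (PySem.List.pyGet? wire (-1)).getD (0, 0)
        (wire, cur)) (wire, x, y)
    = paths.foldl
      (fun (st : List (Int × Int) × Int × Int) p =>
        match pvDeltasB.get? p.1 with
        | some (dx, dy) =>
            let r := pvWalkB dx dy p.2.toNat st.2.1 st.2.2
            (st.1 ++ r.1, r.2)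
        | none => st) (wire, x, y) := by
  intro paths
  induction paths with
  | nil => intro _ _ _ _ _; rfl
  | cons p ps ih =>
      intro wire x y hpre hlast
      have hd := hpre p (List.mem_cons_self ..)
      have hkey : ∃ dx dy, pvDeltasB.get? p.1 = some (dx, dy) ∧
          pvSegA p.1 x y p.2 = (pvWalkB dx dy p.2.toNat x y).1 := by
        rcases hd with h | h | h | h <;> rw [h]
        · exact ⟨0, 1, by decide, segA_U x y p.2⟩
        · exact ⟨1, 0, by decide, segA_R x y p.2⟩
        · exact ⟨0, -1, by decide, segA_D x y p.2⟩
        · exact ⟨-1, 0, by decide, segA_L x y p.2⟩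
      obtain ⟨dx, dy, hget, hseg⟩ := hkey
      simp only [List.foldl_cons]
      have hlast' : (wire ++ (pvWalkB dx dy p.2.toNat x y).1).getLast?
          = some (pvWalkB dx dy p.2.toNat x y).2 := by
        rw [List.getLast?_append, ← pvWalkB_last dx dy p.2.toNat x y]
        cases h : (pvWalkB dx dy p.2.toNat x y).1.getLast? <;> simp [h, hlast]
      have hcur : (PySem.List.pyGet? (wire ++ (pvWalkB dx dy p.2.toNat x y).1) (-1)).getD (0, 0)
          = (pvWalkB dx dy p.2.toNat x y).2 := by
        rw [PySem.List.pyGet?_neg_one, hlast']; rfl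
      rw [hseg, hget]
      simp only [hcur]
      cases hr : pvWalkB dx dy p.2.toNat x y with
      | mk pts c =>
          cases c with
          | mk cx cy =>
              exact ih (wire ++ pts) cx cy (fun q hq => hpre q (List.mem_cons_of_mem _ hq))
                (by rw [hr] at hlast'; exact hlast')

-- ===== VERDICT (by name: the statement is the Claim_ definition above) =====
theorem convert_path_to_wire_spec : Claim_equal_convert_path_to_wire := by
  intro paths _ hpre
  unfold Spec_convert_path_to_wire convert_path_to_wire convert_path_to_wire_alt
  rw [fold_eq paths [(0, 0)] 0 0 hpre rfl]
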